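-- pv_equiv track=rewrite | github.com/Enyalius6/automatic_time_table_generator | prototype2.py | check_permers
-- ===== SOURCE A (Python) =====
-- def check_permers(perm1,perm2):
--     final_perm = []
--     for i in perm1:
--         for j in perm2:
--             c=0
--             for z in range(0,4):
--                 if i[z]!=j[z]:
--                     c+=1
--             if c==4:
--                 final_perm.append((i,j))
--     return final_perm
-- ===== SOURCE B (Python) =====
-- def check_permers(perm1, perm2):
--     # Index perm2: (position z, value at z) -> set of perm2 indices having that value there.
--     index = {}
--     for k, j in enumerate(perm2):
--         for z in range(4):
--             index.setdefault((z, j[z]), set()).add(k)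
--     final_perm = []
--     for i in perm1:
--         bad = set()
--         for z in range(4):
--             bad |= index.get((z, i[z]), set())
--         for k, j in enumerate(perm2):
--             if k not in bad:
--                 final_perm.append((i, j))
--     return final_perm
-- ===== Notes on version B (the rewrite author's own statement) =====
-- stated objective: faster
-- what changed: B first builds a (position, value) -> set-of-perm2-indices dictionary in one pass over perm2, then for each row of perm1 unions the four matching buckets and emits the non-colliding perm2 entries by index, replacing A's per-pair 4-position counting inner loop.
import Mathlib
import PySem

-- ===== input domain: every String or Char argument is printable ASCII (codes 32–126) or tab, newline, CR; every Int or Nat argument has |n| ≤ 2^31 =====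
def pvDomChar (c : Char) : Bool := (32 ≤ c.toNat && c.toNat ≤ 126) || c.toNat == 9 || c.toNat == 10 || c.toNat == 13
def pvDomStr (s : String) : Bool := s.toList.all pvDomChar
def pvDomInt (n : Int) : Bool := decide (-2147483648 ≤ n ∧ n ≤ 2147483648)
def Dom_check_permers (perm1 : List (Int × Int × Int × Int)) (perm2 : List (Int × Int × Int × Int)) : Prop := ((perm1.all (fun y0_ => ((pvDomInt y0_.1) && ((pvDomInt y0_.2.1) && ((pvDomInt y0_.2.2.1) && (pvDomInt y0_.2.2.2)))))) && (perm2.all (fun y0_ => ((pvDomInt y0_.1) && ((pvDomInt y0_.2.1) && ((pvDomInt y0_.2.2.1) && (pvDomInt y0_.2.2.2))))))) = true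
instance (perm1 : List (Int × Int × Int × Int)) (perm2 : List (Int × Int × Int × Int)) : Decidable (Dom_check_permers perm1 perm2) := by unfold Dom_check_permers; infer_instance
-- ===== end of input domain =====

-- B replaces A's count-positions inner scan over all pairs by a (position, value) → perm2-indices
-- index built once, unioned per row of perm1; same return value, different traversal.

-- i[z] on a 4-tuple for z in range(0,4) (the only indices either program uses)
def tupGet (t : Int × Int × Int × Int) (z : Int) : Int :=
  if z = 0 then t.1 else if z = 1 then t.2.1 else if z = 2 then t.2.2.1 else t.2.2.2

-- ===== PORT A =====
def check_permers (perm1 : List (Int × Int × Int × Int)) (perm2 : List (Int × Int × Int × Int)) : List ((Int × Int × Int × Int) × (Int × Int × Int × Int)) :=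
  perm1.foldl (fun final_perm i =>
    perm2.foldl (fun final_perm j =>
      let c : Int := (PySem.List.pyRange 0 4 1).foldl
        (fun c z => if tupGet i z ≠ tupGet j z then c + 1 else c) 0
      if c = 4 then final_perm ++ [(i, j)] else final_perm) final_perm) []

-- ===== PORT B =====
-- 'for z in range(4): index.setdefault((z, j[z]), set()).add(k)' for one (k, j) of enumerate(perm2)
def pvAddTuple (d : PySem.Dict (Int × Int) (PySem.Set Int)) (p : Int × (Int × Int × Int × Int)) :
    PySem.Dict (Int × Int) (PySem.Set Int) :=
  (PySem.List.pyRange 0 4 1).foldl (fun d z =>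
    d.insert (z, tupGet p.2 z) (PySem.Set.add (d.getD (z, tupGet p.2 z) PySem.Set.empty) p.1)) d

def pvBuildIndex (perm2 : List (Int × Int × Int × Int)) : PySem.Dict (Int × Int) (PySem.Set Int) :=
  (PySem.List.enumerate perm2 0).foldl pvAddTuple PySem.Dict.empty

def check_permers_alt (perm1 : List (Int × Int × Int × Int)) (perm2 : List (Int × Int × Int × Int)) : List ((Int × Int × Int × Int) × (Int × Int × Int × Int)) :=
  let index := pvBuildIndex perm2
  perm1.foldl (fun final_perm i =>
    let bad : PySem.Set Int := (PySem.List.pyRange 0 4 1).foldl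
      (fun bad z => PySem.Set.union bad (index.getD (z, tupGet i z) PySem.Set.empty)) PySem.Set.empty
    (PySem.List.enumerate perm2 0).foldl (fun final_perm kj =>
      if PySem.Set.contains bad kj.1 then final_perm else final_perm ++ [(i, kj.2)]) final_perm) []

-- ===== PRECONDITION & SPEC =====
def Spec_check_permers (perm1 : List (Int × Int × Int × Int)) (perm2 : List (Int × Int × Int × Int)) (out : List ((Int × Int × Int × Int) × (Int × Int × Int × Int))) : Prop := out = check_permers_alt perm1 perm2
instance (perm1 : List (Int × Int × Int × Int)) (perm2 : List (Int × Int × Int × Int)) (out : List ((Int × Int × Int × Int) × (Int × Int × Int × Int))) : Decidable (Spec_check_permers perm1 perm2 out) := by unfold Spec_check_permers; infer_instance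

-- ===== CLAIM (what is proved, stated in full; the proofs are below) =====
def Claim_equal_check_permers : Prop := ∀ (perm1 : List (Int × Int × Int × Int)) (perm2 : List (Int × Int × Int × Int)), Dom_check_permers perm1 perm2 → Spec_check_permers perm1 perm2 (check_permers perm1 perm2)

-- ===== LEMMAS AND PROOFS =====

-- "all four positions differ" as a Bool predicate; both programs' filters reduce to it
def diff4 (i j : Int × Int × Int × Int) : Bool :=
  decide (i.1 ≠ j.1) && decide (i.2.1 ≠ j.2.1) && decide (i.2.2.1 ≠ j.2.2.1) && decide (i.2.2.2 ≠ j.2.2.2)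

theorem count4 (i j : Int × Int × Int × Int) :
    (((PySem.List.pyRange 0 4 1).foldl (fun c z => if tupGet i z ≠ tupGet j z then c + 1 else c) (0:Int)) = 4)
      ↔ diff4 i j = true := by
  show (([0,1,2,3] : List Int).foldl (fun c z => if tupGet i z ≠ tupGet j z then c + 1 else c) (0:Int) = 4) ↔ _
  simp only [List.foldl, tupGet, diff4]
  norm_num
  split_ifs <;> simp_all

theorem checkA_eq (perm1 perm2 : List (Int × Int × Int × Int)) :
    check_permers perm1 perm2
      = perm1.flatMap (fun i => (perm2.filter (diff4 i)).map (fun j => (i, j))) := by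
  unfold check_permers
  have hinner : ∀ (acc : List ((Int × Int × Int × Int) × (Int × Int × Int × Int))) (i : Int × Int × Int × Int),
      perm2.foldl (fun final_perm j =>
        let c : Int := (PySem.List.pyRange 0 4 1).foldl
          (fun c z => if tupGet i z ≠ tupGet j z then c + 1 else c) 0
        if c = 4 then final_perm ++ [(i, j)] else final_perm) acc
        = acc ++ (perm2.filter (diff4 i)).map (fun j => (i, j)) := by
    intro acc i
    refine Eq.trans (PySem.List.foldl_congr_mem perm2 _ (fun acc j => if diff4 i j then acc ++ [(i, j)] else acc) acc
      (by intro acc j _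
          by_cases h : diff4 i j = true
          · simp only [(count4 i j).mpr h, h, if_pos]
          · simp only [h]
            rw [if_neg (fun hc => h ((count4 i j).mp hc)), if_neg (by simp)])) ?_
    exact PySem.List.foldl_append_if (diff4 i) (fun j => (i, j)) ..
  refine Eq.trans (PySem.List.foldl_congr_mem perm1 _ (fun acc i => acc ++ (perm2.filter (diff4 i)).map (fun j => (i, j))) []
    (by intro acc i _; exact hinner acc i)) ?_
  exact PySem.List.foldl_append_eq_flatMap _ ..

theorem mem_addTuple (d : PySem.Dict (Int × Int) (PySem.Set Int)) (p : Int × (Int × Int × Int × Int)) (z v k : Int) :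
    k ∈ (pvAddTuple d p).getD (z, v) PySem.Set.empty ↔
      k ∈ d.getD (z, v) PySem.Set.empty ∨ (p.1 = k ∧ (z = 0 ∨ z = 1 ∨ z = 2 ∨ z = 3) ∧ tupGet p.2 z = v) := by
  unfold pvAddTuple
  rw [show PySem.List.pyRange 0 4 1 = [0, 1, 2, 3] from rfl]
  simp only [List.foldl]
  by_cases h0 : z = 0 <;> by_cases h1 : z = 1 <;> by_cases h2 : z = 2 <;> by_cases h3 : z = 3 <;>
    by_cases hv : v = tupGet p.2 z <;> subst_vars <;>
    simp_all [PySem.Dict.getD_insert_of_ne, PySem.Dict.getD_insert_self, PySem.Set.mem_add,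
      Prod.ext_iff, eq_comm]

theorem mem_buildIndex_aux (l : List (Int × (Int × Int × Int × Int)))
    (d : PySem.Dict (Int × Int) (PySem.Set Int)) (z v k : Int) :
    k ∈ (l.foldl pvAddTuple d).getD (z, v) PySem.Set.empty ↔
      k ∈ d.getD (z, v) PySem.Set.empty ∨
        ∃ p ∈ l, p.1 = k ∧ (z = 0 ∨ z = 1 ∨ z = 2 ∨ z = 3) ∧ tupGet p.2 z = v := by
  induction l generalizing d with
  | nil => simp
  | cons p t ih =>
    simp only [List.foldl_cons, ih, mem_addTuple, List.mem_cons]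
    constructor
    · rintro ((h | h) | ⟨q, hq, hrest⟩)
      · exact Or.inl h
      · exact Or.inr ⟨p, Or.inl rfl, h⟩
      · exact Or.inr ⟨q, Or.inr hq, hrest⟩
    · rintro (h | ⟨q, (rfl | hq), hrest⟩)
      · exact Or.inl (Or.inl h)
      · exact Or.inl (Or.inr hrest)
      · exact Or.inr ⟨q, hq, hrest⟩

theorem mem_buildIndex (perm2 : List (Int × Int × Int × Int)) (z v k : Int) :
    k ∈ (pvBuildIndex perm2).getD (z, v) PySem.Set.empty ↔
      ∃ p ∈ PySem.List.enumerate perm2 0,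
        p.1 = k ∧ (z = 0 ∨ z = 1 ∨ z = 2 ∨ z = 3) ∧ tupGet p.2 z = v := by
  unfold pvBuildIndex
  rw [mem_buildIndex_aux]
  exact or_iff_right (by simp [PySem.Dict.empty, PySem.Dict.getD, PySem.Dict.get?, PySem.Set.empty])

-- two entries of enumerate xs 0 with the same index are the same entry
theorem enum_fst_inj {xs : List (Int × Int × Int × Int)} {p q : Int × (Int × Int × Int × Int)}
    (hp : p ∈ PySem.List.enumerate xs 0) (hq : q ∈ PySem.List.enumerate xs 0) (h : p.1 = q.1) :
    p = q := by
  rw [PySem.List.mem_enumerate_iff] at hp hq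
  obtain ⟨a, ha, rfl⟩ := hp
  obtain ⟨b, hb, rfl⟩ := hq
  simp only [zero_add] at h ⊢
  have : a = b := by exact_mod_cast h
  subst this
  rfl

-- membership in the per-row union of buckets ↔ some position of i matches position z of perm2[k]
theorem mem_bad (perm2 : List (Int × Int × Int × Int)) (i : Int × Int × Int × Int)
    (kj : Int × (Int × Int × Int × Int)) (hkj : kj ∈ PySem.List.enumerate perm2 0) :
    PySem.Set.contains ((PySem.List.pyRange 0 4 1).foldl
        (fun bad z => PySem.Set.union bad ((pvBuildIndex perm2).getD (z, tupGet i z) PySem.Set.empty))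
        PySem.Set.empty) kj.1 = true
      ↔ ¬ diff4 i kj.2 = true := by
  rw [PySem.Set.contains_iff]
  rw [show PySem.List.pyRange 0 4 1 = [0, 1, 2, 3] from rfl]
  have hempty : ∀ m : Int, (m ∈ (PySem.Set.empty : PySem.Set Int)) ↔ False := by
    simp [PySem.Set.empty]
  simp only [List.foldl, PySem.Set.mem_union, mem_buildIndex, hempty, false_or]
  constructor
  · rintro (((h | h) | h) | h) <;>
    · obtain ⟨p, hp, hfst, _, hval⟩ := h
      have := enum_fst_inj hp hkj hfst
      subst this
      simp only [tupGet, diff4] at hval ⊢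
      norm_num at hval ⊢
      simp_all
  · intro h
    by_cases e0 : i.1 = kj.2.1
    · exact Or.inl (Or.inl (Or.inl ⟨kj, hkj, rfl, by norm_num, by simp [tupGet, e0]⟩))
    by_cases e1 : i.2.1 = kj.2.2.1
    · exact Or.inl (Or.inl (Or.inr ⟨kj, hkj, rfl, by norm_num, by simp [tupGet, e1]⟩))
    by_cases e2 : i.2.2.1 = kj.2.2.2.1
    · exact Or.inl (Or.inr ⟨kj, hkj, rfl, by norm_num, by simp [tupGet, e2]⟩)
    by_cases e3 : i.2.2.2 = kj.2.2.2.2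
    · exact Or.inr ⟨kj, hkj, rfl, by norm_num, by simp [tupGet, e3]⟩
    · exact absurd (by simp [diff4, e0, e1, e2, e3]) h

theorem enum_filter_map (q : (Int × Int × Int × Int) → Bool)
    (f : (Int × Int × Int × Int) → ((Int × Int × Int × Int) × (Int × Int × Int × Int)))
    (xs : List (Int × Int × Int × Int)) (s : Int) :
    ((PySem.List.enumerate xs s).filter (fun kj => q kj.2)).map (fun kj => f kj.2)
      = (xs.filter q).map f := by
  induction xs generalizing s with
  | nil => simp [PySem.List.enumerate_nil]
  | cons x t ih =>
    rw [PySem.List.enumerate_cons]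
    by_cases h : q x <;> simp [h, ih]

theorem checkB_eq (perm1 perm2 : List (Int × Int × Int × Int)) :
    check_permers_alt perm1 perm2
      = perm1.flatMap (fun i => (perm2.filter (diff4 i)).map (fun j => (i, j))) := by
  unfold check_permers_alt
  have hinner : ∀ (acc : List ((Int × Int × Int × Int) × (Int × Int × Int × Int))) (i : Int × Int × Int × Int),
      (PySem.List.enumerate perm2 0).foldl (fun final_perm kj =>
        if PySem.Set.contains ((PySem.List.pyRange 0 4 1).foldl
            (fun bad z => PySem.Set.union bad ((pvBuildIndex perm2).getD (z, tupGet i z) PySem.Set.empty))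
            PySem.Set.empty) kj.1 then final_perm else final_perm ++ [(i, kj.2)]) acc
        = acc ++ (perm2.filter (diff4 i)).map (fun j => (i, j)) := by
    intro acc i
    refine Eq.trans (PySem.List.foldl_congr_mem (PySem.List.enumerate perm2 0) _
      (fun acc kj => if diff4 i kj.2 then acc ++ [(i, kj.2)] else acc) acc
      (by intro acc kj hkj
          have hb := mem_bad perm2 i kj hkj
          beta_reduce
          split_ifs <;> simp_all)) ?_
    refine Eq.trans (PySem.List.foldl_append_if
      (fun kj : Int × (Int × Int × Int × Int) => diff4 i kj.2)
      (fun kj : Int × (Int × Int × Int × Int) => (i, kj.2)) ..) ?_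
    rw [enum_filter_map (diff4 i) (fun j => (i, j)) perm2 0]
  refine Eq.trans (PySem.List.foldl_congr_mem perm1 _ (fun acc i => acc ++ (perm2.filter (diff4 i)).map (fun j => (i, j))) []
    (by intro acc i _; exact hinner acc i)) ?_
  exact PySem.List.foldl_append_eq_flatMap _ ..

-- ===== VERDICT (by name: the statement is the Claim_ definition above) =====
theorem check_permers_spec : Claim_equal_check_permers := by
  intro perm1 perm2 _
  unfold Spec_check_permers
  rw [checkA_eq, checkB_eq]
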